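-- pv_equiv track=rewrite | github.com/amanknoldus/NLP_Assignment | src/preprocessing/preprocessing.py | expand_tokens
-- ===== SOURCE A (Python) =====
-- def expand_tokens(test_tokens):
--     """
--     Function to expand text to combined with previous and next word.
--     @param test_tokens: tokenized text
--     @return: expanded text
--     """
--     try:
--         expanded_tokens = []
--         for i, token in enumerate(test_tokens):
--             expanded_tokens.append(token)
--             if i < len(test_tokens) - 1:
--                 expanded_tokens.append('_'.join([token, test_tokens[i + 1]]))
--
--         return expanded_tokens
--
--     except RuntimeError:
--         raise ValueError
-- ===== SOURCE B (Python) =====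
-- def expand_tokens(test_tokens):
--     """
--     Function to expand text to combined with previous and next word.
--     @param test_tokens: tokenized text
--     @return: expanded text
--     """
--     try:
--         n = len(test_tokens)
--         if n == 0:
--             return []
--         bigrams = ['_'.join([test_tokens[i], test_tokens[i + 1]])
--                    for i in range(n - 1)]
--         expanded_tokens = [None] * (2 * n - 1)
--         expanded_tokens[0::2] = test_tokens
--         expanded_tokens[1::2] = bigrams
--         return expanded_tokens
--     except RuntimeError:
--         raise ValueError
-- ===== Notes on version B (the rewrite author's own statement) =====
-- stated objective: alternative
-- what changed: Replaces A's single append loop (token, then guarded bigram) by staged passes: first build the whole bigram list by comprehension, then preallocate a 2n-1 slot list and fill it with two strided slice assignments (tokens at even positions, bigrams at odd positions).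
import Mathlib
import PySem

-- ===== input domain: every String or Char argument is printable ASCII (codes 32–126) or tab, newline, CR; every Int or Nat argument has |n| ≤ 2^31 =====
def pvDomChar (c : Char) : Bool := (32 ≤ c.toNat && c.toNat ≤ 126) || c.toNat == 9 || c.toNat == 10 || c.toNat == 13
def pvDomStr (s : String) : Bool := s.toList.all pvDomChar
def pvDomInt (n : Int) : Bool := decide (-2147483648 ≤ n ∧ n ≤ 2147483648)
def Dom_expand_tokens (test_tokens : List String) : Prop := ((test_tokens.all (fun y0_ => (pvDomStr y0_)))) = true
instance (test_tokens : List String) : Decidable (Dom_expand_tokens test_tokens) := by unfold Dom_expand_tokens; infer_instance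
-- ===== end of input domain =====

-- B replaces A's single append loop (token then guarded bigram) by staged passes:
-- build the full bigram list first, then fill a preallocated 2n-1 list via two strided
-- slice assignments (tokens at even slots, bigrams at odd slots); objective: alternative.


-- ===== PORT A =====
-- literal port of A: enumerate loop, append token, then (if i < len-1) append '_'.join([token, ts[i+1]])
-- (the RuntimeError→ValueError wrapper is unreachable: the body raises no RuntimeError)
def expand_tokens (test_tokens : List String) : List String :=
  (PySem.List.enumerate test_tokens).foldl
    (fun acc p =>
      let acc2 := acc ++ [p.2]
      if p.1 < (test_tokens.length : Int) - 1 then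
        acc2 ++ [PySem.Str.join "_" [p.2, PySem.List.pyGetD test_tokens (p.1 + 1) ""]]
      else acc2)
    []

-- ===== PORT B =====
-- hand port (exact here) of the two strided slice assignments
--   out[0::2] = ts; out[1::2] = bigrams   with len(bigrams) = len(ts) - 1:
-- even slots come from the first list, odd slots from the second, alternating.
def stridedFill : List String → List String → List String
  | [], _ => []
  | a :: as, [] => a :: as
  | a :: as, b :: bs => a :: b :: stridedFill as bs

-- literal port of B: if n == 0 return []; build bigrams by comprehension over range(n-1)
-- (indices are always in range, so pyGetD's default is never used), then the strided fill.
def expand_tokens_alt (test_tokens : List String) : List String :=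
  let n : Int := test_tokens.length
  if n == 0 then []
  else
    let bigrams := (PySem.List.pyRange 0 (n - 1) 1).map
      (fun i => PySem.Str.join "_"
        [PySem.List.pyGetD test_tokens i "", PySem.List.pyGetD test_tokens (i + 1) ""])
    stridedFill test_tokens bigrams

-- ===== PRECONDITION & SPEC =====
def Spec_expand_tokens (test_tokens : List String) (out : List String) : Prop := out = expand_tokens_alt test_tokens
instance (test_tokens : List String) (out : List String) : Decidable (Spec_expand_tokens test_tokens out) := by unfold Spec_expand_tokens; infer_instance

-- ===== CLAIM (what is proved, stated in full; the proofs are below) =====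
def Claim_equal_expand_tokens : Prop := ∀ (test_tokens : List String), Dom_expand_tokens test_tokens → Spec_expand_tokens test_tokens (expand_tokens test_tokens)

-- ===== LEMMAS AND PROOFS =====

-- the common interleaving both programs compute
def interleave : List String → List String
  | [] => []
  | [a] => [a]
  | a :: b :: r => a :: PySem.Str.join "_" [a, b] :: interleave (b :: r)

lemma A_go (ts : List String) (rest : List String) (s : Nat) (acc : List String)
    (h : ts.drop s = rest) :
    (PySem.List.enumerate rest (s : Int)).foldl
      (fun acc p =>
        let acc2 := acc ++ [p.2]
        if p.1 < (ts.length : Int) - 1 then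
          acc2 ++ [PySem.Str.join "_" [p.2, PySem.List.pyGetD ts (p.1 + 1) ""]]
        else acc2)
      acc
    = acc ++ interleave rest := by
  induction rest generalizing s acc with
  | nil => simp [PySem.List.enumerate_nil, interleave]
  | cons a rest' IH =>
    have hlen : ts.length - s = rest'.length + 1 := by
      have := congrArg List.length h; simpa using this
    have hs : s < ts.length := by omega
    rw [PySem.List.enumerate_cons]
    cases rest' with
    | nil =>
      have hc : ¬ ((s : Int) < (ts.length : Int) - 1) := by
        simp at hlen; omega
      simp [List.foldl, hc, PySem.List.enumerate_nil, interleave]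
    | cons b r =>
      have hc : (s : Int) < (ts.length : Int) - 1 := by
        simp at hlen; omega
      have hdrop : ts.drop (s + 1) = b :: r := by
        rw [← List.tail_drop, h]; rfl
      have hget : PySem.List.pyGetD ts ((s : Int) + 1) "" = b := by
        have : ((s : Int) + 1) = ((s + 1 : Nat) : Int) := by push_cast; ring
        rw [this, PySem.List.pyGetD_natCast]
        have : ts[s+1]? = some b := by
          have h0 : (ts.drop (s+1))[0]? = ts[(s+1)+0]? := List.getElem?_drop
          rw [hdrop] at h0
          simpa using h0.symm
        simp [List.getD, this]
      have hstart : ((s : Int) + 1) = ((s + 1 : Nat) : Int) := by push_cast; ring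
      simp only [List.foldl, hc, if_pos, hget]
      rw [hstart, IH (s + 1) _ hdrop]
      simp [interleave]

lemma A_eq_interleave (ts : List String) : expand_tokens ts = interleave ts := by
  have := A_go ts ts 0 [] (by simp)
  simpa [expand_tokens] using this

-- the comprehension over range(n-1) builds exactly the adjacent-pair bigrams
lemma bigrams_range (ts : List String) :
    (List.range (ts.length - 1)).map
      (fun (k : Nat) => PySem.Str.join "_"
        [PySem.List.pyGetD ts ((k : Nat) : Int) "", PySem.List.pyGetD ts (((k : Nat) : Int) + 1) ""])
    = (ts.zip ts.tail).map (fun p => PySem.Str.join "_" [p.1, p.2]) := by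
  induction ts with
  | nil => simp
  | cons a tl IH =>
    cases tl with
    | nil => simp
    | cons b r =>
      have hlen : (a :: b :: r : List String).length - 1 = (b :: r : List String).length - 1 + 1 := by
        simp
      rw [hlen, List.range_succ_eq_map, List.map_cons, List.map_map]
      have hhead : PySem.Str.join "_"
          [PySem.List.pyGetD (a :: b :: r) (((0 : Nat) : Nat) : Int) "",
           PySem.List.pyGetD (a :: b :: r) ((((0 : Nat) : Nat) : Int) + 1) ""]
          = PySem.Str.join "_" [a, b] := by
        have e : ((((0 : Nat) : Nat) : Int) + 1) = (((1 : Nat) : Nat) : Int) := by norm_num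
        rw [e, PySem.List.pyGetD_natCast, PySem.List.pyGetD_natCast]
        simp [List.getD]
      have hshift : ∀ k : Nat,
          ((fun (k : Nat) => PySem.Str.join "_"
            [PySem.List.pyGetD (a :: b :: r) ((k : Nat) : Int) "",
             PySem.List.pyGetD (a :: b :: r) (((k : Nat) : Int) + 1) ""]) ∘ Nat.succ) k
          = (fun (k : Nat) => PySem.Str.join "_"
            [PySem.List.pyGetD (b :: r) ((k : Nat) : Int) "",
             PySem.List.pyGetD (b :: r) (((k : Nat) : Int) + 1) ""]) k := by
        intro k
        simp only [Function.comp_apply]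
        have h1 : ((Nat.succ k : Nat) : Int) = (((k + 1 : Nat)) : Int) := by push_cast; ring
        have h3 : (((Nat.succ k : Nat)) : Int) + 1 = (((k + 2 : Nat)) : Int) := by push_cast; ring
        have h2 : ((k : Nat) : Int) + 1 = (((k + 1 : Nat)) : Int) := by push_cast; ring
        rw [h1, h3, h2]
        simp only [PySem.List.pyGetD_natCast]
        simp [List.getD]
      rw [hhead, List.map_congr_left (fun k _ => hshift k), IH]
      simp

-- the strided fill of tokens with their adjacent bigrams is the interleaving
lemma strided_eq_interleave (ts : List String) :
    stridedFill ts ((ts.zip ts.tail).map (fun p => PySem.Str.join "_" [p.1, p.2]))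
    = interleave ts := by
  induction ts with
  | nil => simp [stridedFill, interleave]
  | cons a tl IH =>
    cases tl with
    | nil => simp [stridedFill, interleave]
    | cons b r =>
      simp only [List.tail_cons, List.zip_cons_cons, List.map_cons, stridedFill, interleave]
      rw [← IH]
      simp

lemma B_eq_interleave (ts : List String) : expand_tokens_alt ts = interleave ts := by
  cases ts with
  | nil => simp [expand_tokens_alt, interleave]
  | cons a tl =>
    have hne : ¬ (((a :: tl : List String).length : Int) == 0) = true := by
      simp; omega
    have hcast : ((a :: tl : List String).length : Int) - 1
        = (((a :: tl : List String).length - 1 : Nat) : Int) := by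
      simp
    simp only [expand_tokens_alt]
    rw [if_neg hne, hcast, PySem.List.pyRange_zero_natCast, List.map_map]
    have hcomp : ((fun i => PySem.Str.join "_"
          [PySem.List.pyGetD (a :: tl) i "", PySem.List.pyGetD (a :: tl) (i + 1) ""])
        ∘ (fun (k : Nat) => (k : Int)))
        = fun (k : Nat) => PySem.Str.join "_"
          [PySem.List.pyGetD (a :: tl) ((k : Nat) : Int) "",
           PySem.List.pyGetD (a :: tl) (((k : Nat) : Int) + 1) ""] := rfl
    rw [hcomp, bigrams_range, strided_eq_interleave]

-- ===== VERDICT (by name: the statement is the Claim_ definition above) =====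
theorem expand_tokens_spec : Claim_equal_expand_tokens := by
  intro ts _
  unfold Spec_expand_tokens
  rw [A_eq_interleave, B_eq_interleave]
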